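-- pv_equiv track=rewrite | github.com/m1sterzer0/codejams | python/2013/1A/A.py | solve
-- ===== SOURCE A (Python) =====
-- def solve(inp) :
--     (r,t) = inp
--     a,b = 0,1000000000000000000
--     while (b-a) > 1 :
--         k = (b+a) // 2
--         paintNeeded = 2*r*k + 2*k*k - k
--         if t >= paintNeeded : a = k
--         else                : b = k
--     return "%d" % a
-- ===== SOURCE B (Python) =====
-- def _isqrt(n):
--     # bitwise integer square root; exact for 0 <= n < 2**70
--     root = 0
--     bit = 1 << 34
--     while bit:
--         if (root + bit) * (root + bit) <= n:
--             root += bit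
--         bit >>= 1
--     return root
--
-- def solve(inp):
--     (r, t) = inp
--     c = 2 * r - 1
--     d = c * c + 8 * t          # discriminant of 2k^2 + c*k - t = 0
--     if d < 0:
--         return "0"
--     k = (_isqrt(d) - c) // 4   # floor of the positive root
--     if k < 0:
--         k = 0
--     return "%d" % k
-- ===== Notes on version B (the rewrite author's own statement) =====
-- stated objective: alternative
-- what changed: Replaces the 60-iteration bisection over [0,10^18] with a closed-form quadratic solve: an exact bitwise integer square root of the discriminant (2r-1)^2+8t, the floor of the positive root, and a clamp at 0.
-- outside the precondition, e.g. on solve((-24, -300)): A returns '0', B returns '12'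
import Mathlib
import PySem

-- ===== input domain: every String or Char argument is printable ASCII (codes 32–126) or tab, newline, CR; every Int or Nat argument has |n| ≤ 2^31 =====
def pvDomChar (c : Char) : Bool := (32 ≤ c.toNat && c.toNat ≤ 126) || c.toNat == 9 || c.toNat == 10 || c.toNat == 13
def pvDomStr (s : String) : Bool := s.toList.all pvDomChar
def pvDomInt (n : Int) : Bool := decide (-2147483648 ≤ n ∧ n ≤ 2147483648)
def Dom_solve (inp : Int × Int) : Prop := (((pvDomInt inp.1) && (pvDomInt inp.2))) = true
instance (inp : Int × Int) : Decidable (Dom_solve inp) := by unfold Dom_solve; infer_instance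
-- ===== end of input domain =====

-- B replaces A's 60-step bisection by a closed-form quadratic solve (bitwise integer sqrt of the
-- discriminant + floor of the positive root); equivalence is proved on Pre_ (r ≥ 0 ∨ t ≥ 0).

-- ===== PORT A =====
/-- A's `while (b-a) > 1` bisection loop, step for step. -/
def solveLoop (r t a b : Int) : Int :=
  if _h : b - a > 1 then
    let k := PySem.Int.floordiv (b + a) 2
    let paintNeeded := 2*r*k + 2*k*k - k
    if t ≥ paintNeeded then solveLoop r t k b else solveLoop r t a k
  else a
termination_by (b - a).toNat
decreasing_by
  all_goals
    rw [PySem.Int.floordiv_eq_ediv_of_pos (by omega : (0:Int) < 2)] at *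
    omega

def solve (inp : Int × Int) : String :=
  PySem.Int.toStr (solveLoop inp.1 inp.2 0 1000000000000000000)

-- ===== PORT B =====
/-- Port of `_isqrt`'s `while bit:` loop.  Python's `bit` is a nonnegative power of two
throughout (`1 << 34` halved), so it is carried as a `Nat`: `bit >>= 1` is `bit / 2`,
truthiness `while bit` is `bit ≠ 0`. -/
def isqrtAux (n root : Int) (bit : Nat) : Int :=
  if _h : bit ≠ 0 then
    if (root + (bit : Int)) * (root + (bit : Int)) ≤ n then
      isqrtAux n (root + (bit : Int)) (bit / 2)
    else
      isqrtAux n root (bit / 2)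
  else root
termination_by bit
decreasing_by all_goals omega

def isqrt (n : Int) : Int := isqrtAux n 0 (1 <<< 34)

def solve_alt (inp : Int × Int) : String :=
  let r := inp.1
  let t := inp.2
  let c := 2 * r - 1
  let d := c * c + 8 * t
  if d < 0 then "0"
  else
    let k := PySem.Int.floordiv (isqrt d - c) 4
    if k < 0 then PySem.Int.toStr 0 else PySem.Int.toStr k

-- ===== PRECONDITION & SPEC =====
-- Pre_ excludes r < 0 ∧ t < 0 (outside the problem's natural domain of positive radius and paint):
-- there the paint requirement is non-monotone in k, "maximal feasible k" is an unspecified corner,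
-- and A's bisection of a non-monotone predicate returns an accidental dyadic point.
def Pre_solve (inp : Int × Int) : Prop := 0 ≤ inp.1 ∨ 0 ≤ inp.2
instance (inp : Int × Int) : Decidable (Pre_solve inp) := by unfold Pre_solve; infer_instance

def pvWitness_solve : (Int × Int) := (3, 100)

def Spec_solve (inp : Int × Int) (out : String) : Prop := out = solve_alt inp
instance (inp : Int × Int) (out : String) : Decidable (Spec_solve inp out) := by unfold Spec_solve; infer_instance

-- ===== CLAIM (what is proved, stated in full; the proofs are below) =====
def Claim_equal_solve : Prop := ∀ (inp : Int × Int), Dom_solve inp → Pre_solve inp → Spec_solve inp (solve inp)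

-- ===== LEMMAS AND PROOFS =====

/-- Feasibility predicate of A's loop: k rings need at most t paint. -/
def Feas (r t k : Int) : Prop := 2*r*k + 2*k*k - k ≤ t

/-- Under Pre_, feasibility is downward closed on k ≥ 0. -/
lemma feas_dc (r t j k : Int) (hpre : 0 ≤ r ∨ 0 ≤ t) (hj : 0 ≤ j) (hjk : j ≤ k)
    (hk : Feas r t k) : Feas r t j := by
  unfold Feas at *
  rcases eq_or_lt_of_le hjk with hjk0 | hjk0
  · rw [hjk0]; exact hk
  rcases hpre with hr | ht
  · nlinarith [mul_nonneg (by omega : (0:Int) ≤ k - j) (by omega : (0:Int) ≤ 2*r + 2*k + 2*j - 1)]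
  · rcases eq_or_lt_of_le (show (0:Int) ≤ k by omega) with hk0 | hk0
    · have hj0 : j = 0 := by omega
      rw [hj0]
      simpa using ht
    · nlinarith [mul_nonneg (by omega : (0:Int) ≤ j) (by omega : (0:Int) ≤ k - j),
        mul_nonneg hj (mul_nonneg hj (by omega : (0:Int) ≤ k - j))]

/-- A's bisection loop lands on a point y with `Feas y ∨ y = 0` and `¬ Feas (y+1)`. -/
lemma solveLoop_char (r t a b : Int) (ha : 0 ≤ a) (hab : a < b)
    (hPa : Feas r t a ∨ a = 0) (hPb : ¬ Feas r t b) :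
    a ≤ solveLoop r t a b ∧ solveLoop r t a b < b ∧
      (Feas r t (solveLoop r t a b) ∨ solveLoop r t a b = 0) ∧
      ¬ Feas r t (solveLoop r t a b + 1) := by
  have main : ∀ (m : Nat) (a b : Int), (b - a).toNat ≤ m → 0 ≤ a → a < b →
      (Feas r t a ∨ a = 0) → ¬ Feas r t b →
      a ≤ solveLoop r t a b ∧ solveLoop r t a b < b ∧
        (Feas r t (solveLoop r t a b) ∨ solveLoop r t a b = 0) ∧
        ¬ Feas r t (solveLoop r t a b + 1) := by
    intro m
    induction m with
    | zero => intro a b hm ha hab hPa hPb; omega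
    | succ m ih =>
      intro a b hm ha hab hPa hPb
      rw [solveLoop]
      by_cases h : b - a > 1
      · simp only [dif_pos h]
        have hk : PySem.Int.floordiv (b + a) 2 = (b + a) / 2 :=
          PySem.Int.floordiv_eq_ediv_of_pos (by omega)
        have hka : a < PySem.Int.floordiv (b + a) 2 := by omega
        have hkb : PySem.Int.floordiv (b + a) 2 < b := by omega
        by_cases hif : t ≥ 2*r*(PySem.Int.floordiv (b + a) 2) +
            2*(PySem.Int.floordiv (b + a) 2)*(PySem.Int.floordiv (b + a) 2) -
            PySem.Int.floordiv (b + a) 2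
        · rw [if_pos hif]
          obtain ⟨i1, i2, i3, i4⟩ :=
            ih _ b (by omega) (by omega) hkb (Or.inl hif) hPb
          exact ⟨by omega, i2, i3, i4⟩
        · rw [if_neg hif]
          obtain ⟨i1, i2, i3, i4⟩ :=
            ih a _ (by omega) ha hka hPa hif
          exact ⟨i1, by omega, i3, i4⟩
      · simp only [dif_neg h]
        have hb : b = a + 1 := by omega
        exact ⟨le_refl a, by omega, hPa, hb ▸ hPb⟩
  exact main (b - a).toNat a b le_rfl ha hab hPa hPb

/-- The characterization is unique under Pre_. -/
lemma char_unique (r t y z : Int) (hpre : 0 ≤ r ∨ 0 ≤ t)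
    (hy0 : 0 ≤ y) (hy : Feas r t y ∨ y = 0) (hy1 : ¬ Feas r t (y + 1))
    (hz0 : 0 ≤ z) (hz : Feas r t z ∨ z = 0) (hz1 : ¬ Feas r t (z + 1)) : y = z := by
  by_contra hne
  rcases lt_or_gt_of_ne hne with hlt | hlt
  · rcases hz with hz | hz
    · exact hy1 (feas_dc r t (y+1) z hpre (by omega) (by omega) hz)
    · omega
  · rcases hy with hy | hy
    · exact hz1 (feas_dc r t (z+1) y hpre (by omega) (by omega) hy)
    · omega

lemma isqrtAux_zero (n root : Int) : isqrtAux n root 0 = root := by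
  rw [isqrtAux]; simp

lemma isqrtAux_one (n root : Int) :
    isqrtAux n root 1 = if (root + 1) * (root + 1) ≤ n then root + 1 else root := by
  rw [isqrtAux]
  norm_num [isqrtAux_zero]

/-- The bitwise isqrt loop is an exact integer square root, by induction on the bit position. -/
lemma isqrtAux_spec (j : Nat) : ∀ (n root : Int), 0 ≤ root → root * root ≤ n →
    n < (root + 2^(j+1)) * (root + 2^(j+1)) →
    0 ≤ isqrtAux n root (2^j) ∧ isqrtAux n root (2^j) * isqrtAux n root (2^j) ≤ n ∧
      n < (isqrtAux n root (2^j) + 1) * (isqrtAux n root (2^j) + 1) := by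
  induction j with
  | zero =>
    intro n root hroot h1 h2
    norm_num at h2 ⊢
    rw [isqrtAux_one]
    split_ifs with hif
    · exact ⟨by omega, hif, by nlinarith [h2]⟩
    · exact ⟨hroot, h1, by nlinarith [hif]⟩
  | succ j ih =>
    intro n root hroot h1 h2
    rw [isqrtAux]
    have hne : (2:Nat)^(j+1) ≠ 0 := by positivity
    have hdiv : (2:Nat)^(j+1) / 2 = 2^j := by
      rw [pow_succ, Nat.mul_div_cancel]
      norm_num
    have hps : (2:Int)^(j+1+1) = 2^(j+1) + 2^(j+1) := by rw [pow_succ]; ring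
    by_cases hif : (root + ((2^(j+1) : Nat) : Int)) * (root + ((2^(j+1) : Nat) : Int)) ≤ n
    · simp only [dif_pos hne, if_pos hif, hdiv]
      refine ih n (root + ((2^(j+1):Nat) : Int)) (by positivity) hif ?_
      push_cast at h2 ⊢
      rw [hps] at h2
      nlinarith [h2]
    · simp only [dif_pos hne, if_neg hif, hdiv]
      refine ih n root hroot h1 ?_
      push_cast at hif ⊢
      nlinarith [hif]

lemma isqrt_spec (n : Int) (h0 : 0 ≤ n) (h1 : n < 2^70) :
    0 ≤ isqrt n ∧ isqrt n * isqrt n ≤ n ∧ n < (isqrt n + 1) * (isqrt n + 1) := by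
  have h : (1 <<< 34 : Nat) = 2^34 := by simp [Nat.shiftLeft_eq]
  unfold isqrt
  rw [h]
  refine isqrtAux_spec 34 n 0 le_rfl (by omega) ?_
  norm_num at h1 ⊢
  omega

/-- Completing the square: feasibility is a bound on `(4k + (2r-1))^2` by the discriminant. -/
lemma feas_iff (r t k : Int) :
    Feas r t k ↔ (4*k + (2*r-1)) * (4*k + (2*r-1)) ≤ (2*r-1)*(2*r-1) + 8*t := by
  unfold Feas
  constructor <;> intro h <;> nlinarith

lemma sq_le_of_abs_le (x s : Int) (h1 : -s ≤ x) (h2 : x ≤ s) : x * x ≤ s * s := by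
  nlinarith [mul_nonneg (by linarith : (0:Int) ≤ s - x) (by linarith : (0:Int) ≤ s + x)]

-- ===== VERDICT (by name: the statement is the Claim_ definition above) =====
theorem solve_spec : Claim_equal_solve := by
  intro inp hdom hpre
  obtain ⟨r, t⟩ := inp
  unfold Dom_solve pvDomInt at hdom
  simp only [Bool.and_eq_true, decide_eq_true_eq] at hdom
  obtain ⟨⟨hr1, hr2⟩, ht1, ht2⟩ := hdom
  unfold Pre_solve at hpre
  simp only at hpre
  unfold Spec_solve solve solve_alt
  dsimp only
  -- A's side: characterize the bisection result y
  have hc2 : (2*r - 1) * (2*r - 1) ≤ 4294967297 * 4294967297 :=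
    sq_le_of_abs_le _ _ (by omega) (by omega)
  have hPb : ¬ Feas r t 1000000000000000000 := by
    rw [feas_iff]
    intro hcon
    have hM : (3000000000000000000:Int) ≤ 4*1000000000000000000 + (2*r - 1) := by omega
    have := mul_le_mul hM hM (by omega) (by omega)
    linarith
  have hA := solveLoop_char r t 0 1000000000000000000 le_rfl (by norm_num) (Or.inr rfl) hPb
  set y := solveLoop r t 0 1000000000000000000 with hy
  obtain ⟨hy0, _, hyf, hyn⟩ := hA
  by_cases hdneg : (2*r - 1) * (2*r - 1) + 8 * t < 0
  · -- discriminant negative: nothing is feasible, A returns 0, B returns "0"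
    simp only [if_pos hdneg]
    have hnf : ∀ k : Int, ¬ Feas r t k := by
      intro k hk
      unfold Feas at hk
      nlinarith [sq_nonneg (4*k + (2*r - 1))]
    have hy0' : y = 0 := by
      rcases hyf with h | h
      · exact absurd h (hnf y)
      · exact h
    rw [hy0']
    decide
  · rw [not_lt] at hdneg
    simp only [if_neg (not_lt.mpr hdneg)]
    -- isqrt of the discriminant
    have hdub : (2*r - 1) * (2*r - 1) + 8 * t < 2^70 := by
      have : (2:Int)^70 = 1180591620717411303424 := by norm_num
      omega
    obtain ⟨hs0, hs1, hs2⟩ := isqrt_spec _ hdneg hdub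
    set s := isqrt ((2*r - 1) * (2*r - 1) + 8 * t) with hs
    -- k0 = (s - c) // 4
    have h4 := PySem.Int.floordiv_mul_add_mod (s - (2*r - 1)) 4
    have hm0 := PySem.Int.mod_nonneg (s - (2*r - 1)) (by norm_num : (0:Int) < 4)
    have hm1 := PySem.Int.mod_lt (s - (2*r - 1)) (by norm_num : (0:Int) < 4)
    set k0 := PySem.Int.floordiv (s - (2*r - 1)) 4 with hk0
    have hb1 : 4 * k0 ≤ s - (2*r - 1) := by omega
    have hb2 : s - (2*r - 1) < 4 * k0 + 4 := by omega
    -- the B value kB and its characterization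
    set kB : Int := if k0 < 0 then 0 else k0 with hkB
    have hkB0 : 0 ≤ kB := by rw [hkB]; split <;> omega
    have hkBn : ¬ Feas r t (kB + 1) := by
      rw [feas_iff]
      intro hcon
      have h1 : s + 1 ≤ 4 * (kB + 1) + (2*r - 1) := by rw [hkB]; split <;> omega
      have := mul_le_mul h1 h1 (by omega) (by omega)
      linarith
    have hkBf : Feas r t kB ∨ kB = 0 := by
      rcases lt_or_ge k0 0 with h | h
      · right; rw [hkB]; simp [h]
      · rcases eq_or_lt_of_le h with h0 | h0
        · right; rw [hkB]; simp [← h0]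
        · left
          have hkBe : kB = k0 := by rw [hkB]; simp [not_lt.mpr h]
          rw [hkBe, feas_iff]
          have hup : 4 * k0 + (2*r - 1) ≤ s := by omega
          have hlow : -s ≤ 4 * k0 + (2*r - 1) := by
            rcases hpre with hr | ht
            · omega
            · -- r may be negative: from c^2 ≤ d < (s+1)^2 get -(2r-1) ≤ s
              have hcs : -(2*r - 1) ≤ s := by
                by_contra hcon
                rw [not_le] at hcon
                have h1 : s + 1 ≤ -(2*r - 1) := by omega
                have := mul_le_mul h1 h1 (by omega) (by omega)
                nlinarith
              omega
          have := sq_le_of_abs_le _ _ hlow hup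
          linarith
    -- uniqueness: y = kB
    have hyeq : y = kB := char_unique r t y kB hpre hy0 hyf hyn hkB0 hkBf hkBn
    rw [hyeq, hkB]
    split
    · rfl
    · rfl
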